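-- pv_equiv track=rewrite | github.com/learn-ukrainian/learn-ukrainian.github.io | scripts/audit/checks/yaml_schema_fixes.py | _convert_quotes_to_guillemets
-- ===== SOURCE A (Python) =====
-- def _convert_quotes_to_guillemets(text: str) -> str:
--     """Convert ASCII double quotes to guillemets in alternating pairs."""
--     result = []
--     quote_open = False
--     for char in text:
--         if char == '"':
--             result.append('\u00bb' if quote_open else '\u00ab')
--             quote_open = not quote_open
--         else:
--             result.append(char)
--     return ''.join(result)
-- ===== SOURCE B (Python) =====
-- def _convert_quotes_to_guillemets(text: str) -> str:
--     """Convert ASCII double quotes to guillemets in alternating pairs."""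
--     parts = text.split('"')
--     pieces = [parts[0]]
--     for i, part in enumerate(parts[1:]):
--         pieces.append('\u00ab' if i % 2 == 0 else '\u00bb')
--         pieces.append(part)
--     return ''.join(pieces)
-- ===== Notes on version B (the rewrite author's own statement) =====
-- stated objective: alternative
-- what changed: Replaces the per-character loop with a boolean open/close toggle by split-on-quote tokenization followed by reassembly where each guillemet is chosen from the segment index's parity.
import Mathlib
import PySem

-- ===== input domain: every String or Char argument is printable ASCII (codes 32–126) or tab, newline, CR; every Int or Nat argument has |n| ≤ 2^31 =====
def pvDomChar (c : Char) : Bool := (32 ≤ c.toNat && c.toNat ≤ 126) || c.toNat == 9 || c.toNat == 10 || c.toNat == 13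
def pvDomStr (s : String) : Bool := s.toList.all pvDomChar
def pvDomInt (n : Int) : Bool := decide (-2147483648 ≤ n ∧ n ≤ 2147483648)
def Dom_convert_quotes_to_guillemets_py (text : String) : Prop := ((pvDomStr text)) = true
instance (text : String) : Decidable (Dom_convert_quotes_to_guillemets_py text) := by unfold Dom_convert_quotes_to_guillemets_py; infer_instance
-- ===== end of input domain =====

-- B replaces A's per-character quote_open toggle loop by split-on-'"' tokenization and
-- index-parity reassembly (objective: alternative decomposition, same asymptotic cost).

-- ===== PORT A =====
-- literal port of A: fold over the characters carrying (result, quote_open)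
def convert_quotes_to_guillemets_py (text : String) : String :=
  String.mk ((text.toList.foldl
    (fun (st : List Char × Bool) c =>
      if c = '"' then (st.1 ++ [if st.2 then '»' else '«'], !st.2)
      else (st.1 ++ [c], st.2))
    ([], false)).1)

-- ===== PORT B =====
-- literal port of Source B: parts = text.split('"') (ported as List.splitOn on the char list);
-- pieces = [parts[0]]; for i, part in enumerate(parts[1:]): append guillemet by parity of i, then part
def convert_quotes_to_guillemets_py_alt (text : String) : String :=
  let parts := text.toList.splitOn '"'
  let pieces := ((parts.drop 1).zipIdx).foldl
    (fun (acc : List (List Char)) (pi : List Char × Nat) =>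
      (acc ++ [if pi.2 % 2 = 0 then ['«'] else ['»']]) ++ [pi.1])
    [parts.headD []]
  String.mk pieces.flatten

-- ===== PRECONDITION & SPEC =====
def Spec_convert_quotes_to_guillemets_py (text : String) (out : String) : Prop := out = convert_quotes_to_guillemets_py_alt text
instance (text : String) (out : String) : Decidable (Spec_convert_quotes_to_guillemets_py text out) := by unfold Spec_convert_quotes_to_guillemets_py; infer_instance

-- ===== CLAIM (what is proved, stated in full; the proofs are below) =====
def Claim_equal_convert_quotes_to_guillemets_py : Prop := ∀ (text : String), Dom_convert_quotes_to_guillemets_py text → Spec_convert_quotes_to_guillemets_py text (convert_quotes_to_guillemets_py text)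

-- ===== LEMMAS AND PROOFS =====

-- the character-level meaning of A's loop body, as a structural recursion
def pvCore : List Char → Bool → List Char
  | [], _ => []
  | c :: cs, b =>
      if c = '"' then (if b then '»' else '«') :: pvCore cs (!b)
      else c :: pvCore cs b

-- the character-level meaning of B's reassembly of the parts after the first, from index j
def pvGlue : List (List Char) → Nat → List Char
  | [], _ => []
  | p :: rest, j => (if j % 2 = 0 then '«' else '»') :: (p ++ pvGlue rest (j + 1))

theorem pvFoldA (cs : List Char) (acc : List Char) (b : Bool) :
    (cs.foldl
      (fun (st : List Char × Bool) c =>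
        if c = '"' then (st.1 ++ [if st.2 then '»' else '«'], !st.2)
        else (st.1 ++ [c], st.2))
      (acc, b)).1 = acc ++ pvCore cs b := by
  induction cs generalizing acc b with
  | nil => simp [pvCore]
  | cons c cs ih =>
      by_cases h : c = '"' <;> simp [pvCore, h, ih]

theorem pvFoldB (ts : List (List Char)) (j : Nat) (acc : List (List Char)) :
    ((ts.zipIdx j).foldl
      (fun (acc : List (List Char)) (pi : List Char × Nat) =>
        (acc ++ [if pi.2 % 2 = 0 then ['«'] else ['»']]) ++ [pi.1])
      acc).flatten = acc.flatten ++ pvGlue ts j := by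
  induction ts generalizing j acc with
  | nil => simp [pvGlue]
  | cons p rest ih =>
      rw [List.zipIdx_cons, List.foldl_cons, ih]
      by_cases h : j % 2 = 0 <;> simp [pvGlue, h]

theorem pvSplitOn_ne_nil (cs : List Char) : cs.splitOn '"' ≠ [] := by
  induction cs with
  | nil => simp [List.splitOn]
  | cons c cs ih =>
      simp only [List.splitOn, List.splitOnP_cons] at *
      split
      · simp
      · cases h : cs.splitOnP (· == '"') with
        | nil => exact absurd h ih
        | cons p rest => simp

theorem pvCore_splitOn (cs : List Char) (j : Nat) :
    pvCore cs (j % 2 == 1) =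
      (cs.splitOn '"').headD [] ++ pvGlue ((cs.splitOn '"').drop 1) j := by
  induction cs generalizing j with
  | nil => simp [pvCore, List.splitOn, pvGlue]
  | cons c cs ih =>
      by_cases h : c = '"'
      · subst h
        have hne := pvSplitOn_ne_nil cs
        cases hsp : cs.splitOn '"' with
        | nil => exact absurd hsp hne
        | cons p rest =>
            have ih' := ih (j + 1)
            rw [hsp] at ih'
            have hb : ((j + 1) % 2 == 1) = !(j % 2 == 1) := by
              rcases Nat.mod_two_eq_zero_or_one j with h2 | h2 <;>
                simp [Nat.add_mod, h2]
            simp only [List.splitOn, List.splitOnP_cons] at *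
            simp only [pvCore, beq_self_eq_true, if_true, hsp]
            rw [← hb, ih']
            rcases Nat.mod_two_eq_zero_or_one j with h2 | h2 <;> simp [pvGlue, h2]
      · have hne := pvSplitOn_ne_nil cs
        cases hsp : cs.splitOn '"' with
        | nil => exact absurd hsp hne
        | cons p rest =>
            have ih' := ih j
            rw [hsp] at ih'
            simp only [List.splitOn, List.splitOnP_cons] at *
            simp only [pvCore, beq_iff_eq, hsp, h, if_false, List.modifyHead]
            simpa using congrArg (c :: ·) ih'

-- ===== VERDICT (by name: the statement is the Claim_ definition above) =====
theorem convert_quotes_to_guillemets_py_spec : Claim_equal_convert_quotes_to_guillemets_py := by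
  intro text _
  unfold Spec_convert_quotes_to_guillemets_py convert_quotes_to_guillemets_py convert_quotes_to_guillemets_py_alt
  have hA := pvFoldA text.toList [] false
  have hB := pvFoldB ((text.toList.splitOn '"').drop 1) 0 [(text.toList.splitOn '"').headD []]
  have hC := pvCore_splitOn text.toList 0
  have h0 : ((0 : Nat) % 2 == 1) = false := by decide
  rw [h0] at hC
  simp only [List.nil_append] at hA
  simp only [List.flatten_cons, List.flatten_nil, List.append_nil] at hB
  simp only [hA, hB, hC]
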